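-- pv_equiv track=rewrite | github.com/Hawkeye-789/Trabalho-Bioinspirados | agpso1.py | construir_tabela_arestas
-- ===== SOURCE A (Python) =====
-- def construir_tabela_arestas(pai1, pai2):
--
--     #Cria a tabela de vizinhos (arestas) de cada elemento com base nos dois pais.
--
--     def vizinhos(lst, i):
--         n = len(lst)
--         idx = lst.index(i)
--         return [lst[(idx - 1) % n], lst[(idx + 1) % n]]
--
--     arestas = {}
--     for gene in pai1:
--         arestas[gene] = set(vizinhos(pai1, gene))
--     for gene in pai2:
--         arestas[gene].update(vizinhos(pai2, gene))
--
--     return arestas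
-- ===== SOURCE B (Python) =====
-- def construir_tabela_arestas(pai1, pai2):
--     # Edge-centric: seed empty sets from pai1's genes, then for each parent
--     # register every cyclic edge in two directed sweeps (predecessor direction,
--     # then successor direction) instead of a per-gene list.index neighbor lookup.
--     arestas = {g: set() for g in pai1}
--     for lst in (pai1, pai2):
--         n = len(lst)
--         for i in range(n):
--             arestas[lst[(i + 1) % n]].add(lst[i])
--         for i in range(n):
--             arestas[lst[i]].add(lst[(i + 1) % n])
--     return arestas
-- ===== Notes on version B (the rewrite author's own statement) =====
-- stated objective: alternative
-- what changed: B is edge-centric: it seeds empty neighbor sets from pai1 and then registers each cyclic edge of each parent in two directed linear sweeps over adjacent index pairs, instead of A's gene-centric loops that re-locate every gene with list.index and read off its two neighbors.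
-- outside the precondition, e.g. on construir_tabela_arestas([1, 1, 0, 1], [1, 1, 0, 1]): A returns {1: {1}, 0: {1}}, B returns {1: {0, 1}, 0: {1}}
import Mathlib
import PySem

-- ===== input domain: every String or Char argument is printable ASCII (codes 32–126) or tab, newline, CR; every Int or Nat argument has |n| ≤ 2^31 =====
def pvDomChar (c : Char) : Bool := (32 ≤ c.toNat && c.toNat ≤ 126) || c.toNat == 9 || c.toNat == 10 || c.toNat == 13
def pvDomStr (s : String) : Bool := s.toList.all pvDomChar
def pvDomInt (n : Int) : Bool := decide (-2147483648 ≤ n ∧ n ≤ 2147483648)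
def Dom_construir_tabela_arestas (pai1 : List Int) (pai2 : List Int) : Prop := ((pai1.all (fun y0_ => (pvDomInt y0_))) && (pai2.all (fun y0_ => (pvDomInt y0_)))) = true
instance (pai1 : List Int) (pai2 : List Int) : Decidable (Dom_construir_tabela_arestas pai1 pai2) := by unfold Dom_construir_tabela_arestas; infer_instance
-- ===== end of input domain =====

-- B builds the table edge-centrically (two directed sweeps over cyclic index pairs per
-- parent) instead of A's per-gene list.index neighbor lookup.

-- ===== PORT A =====
-- A's inner helper vizinhos(lst, i); none = the ValueError of lst.index
def pvVizinhos (lst : List Int) (i : Int) : Option (List Int) :=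
  let n : Int := PySem.List.len lst
  (PySem.List.index? lst i).bind fun idx =>
    (PySem.List.pyGet? lst (PySem.Int.mod ((idx : Int) - 1) n)).bind fun a =>
      (PySem.List.pyGet? lst (PySem.Int.mod ((idx : Int) + 1) n)).map fun b =>
        [a, b]

-- body of A's first loop: arestas[gene] = set(vizinhos(pai1, gene))
def pvStepA1 (pai1 : List Int) (od : Option (PySem.Dict Int (PySem.Set Int))) (gene : Int) :
    Option (PySem.Dict Int (PySem.Set Int)) :=
  od.bind fun d => (pvVizinhos pai1 gene).map fun viz =>
    d.insert gene (PySem.Set.ofList viz)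

-- body of A's second loop: arestas[gene].update(vizinhos(pai2, gene)); none = KeyError
def pvStepA2 (pai2 : List Int) (od : Option (PySem.Dict Int (PySem.Set Int))) (gene : Int) :
    Option (PySem.Dict Int (PySem.Set Int)) :=
  od.bind fun d => (d.get? gene).bind fun s => (pvVizinhos pai2 gene).map fun viz =>
    d.insert gene (PySem.Set.update s viz)

def construir_tabela_arestas (pai1 : List Int) (pai2 : List Int) : List (Int × List Int) :=
  ((pai2.foldl (pvStepA2 pai2) (pai1.foldl (pvStepA1 pai1) (some PySem.Dict.empty))).getD
      PySem.Dict.empty).items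

-- ===== PORT B =====
-- body of B's first sweep: arestas[lst[(i+1) % n]].add(lst[i]); none = IndexError/KeyError
def pvSweepPrev (lst : List Int) (od : Option (PySem.Dict Int (PySem.Set Int))) (i : Int) :
    Option (PySem.Dict Int (PySem.Set Int)) :=
  od.bind fun d =>
    (PySem.List.pyGet? lst (PySem.Int.mod (i + 1) (PySem.List.len lst))).bind fun b =>
      (d.get? b).bind fun s =>
        (PySem.List.pyGet? lst i).map fun a => d.insert b (PySem.Set.add s a)

-- body of B's second sweep: arestas[lst[i]].add(lst[(i+1) % n])
def pvSweepNext (lst : List Int) (od : Option (PySem.Dict Int (PySem.Set Int))) (i : Int) :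
    Option (PySem.Dict Int (PySem.Set Int)) :=
  od.bind fun d =>
    (PySem.List.pyGet? lst i).bind fun a =>
      (d.get? a).bind fun s =>
        (PySem.List.pyGet? lst (PySem.Int.mod (i + 1) (PySem.List.len lst))).map fun b =>
          d.insert a (PySem.Set.add s b)

-- B's body of 'for lst in (pai1, pai2)': the two directed sweeps over range(n)
def pvParentPass (od : Option (PySem.Dict Int (PySem.Set Int))) (lst : List Int) :
    Option (PySem.Dict Int (PySem.Set Int)) :=
  let n := PySem.List.len lst
  (PySem.List.pyRange 0 n 1).foldl (pvSweepNext lst)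
    ((PySem.List.pyRange 0 n 1).foldl (pvSweepPrev lst) od)

def construir_tabela_arestas_alt (pai1 : List Int) (pai2 : List Int) : List (Int × List Int) :=
  let d0 := pai1.foldl (fun d g => d.insert g PySem.Set.empty) PySem.Dict.empty
  (([pai1, pai2].foldl pvParentPass (some d0)).getD PySem.Dict.empty).items

-- ===== PRECONDITION & SPEC =====
-- all occurrences of a gene in lst have the same cyclic predecessor and successor
-- (trivially true for permutations, the intended inputs)
def pvCyclicConsistent (lst : List Int) : Prop :=
  ∀ i, i < lst.length → ∀ j, j < lst.length → lst.getD i 0 = lst.getD j 0 →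
    lst.getD ((i + lst.length - 1) % lst.length) 0 = lst.getD ((j + lst.length - 1) % lst.length) 0 ∧
    lst.getD ((i + 1) % lst.length) 0 = lst.getD ((j + 1) % lst.length) 0

-- Pre_ requires every pai2 gene to occur in pai1 (otherwise A raises KeyError), and excludes
-- parents in which some repeated gene has different cyclic neighbors at different occurrences:
-- there the parents are not permutations and A's neighbor choice via the FIRST .index hit is an
-- accident of its implementation.
def Pre_construir_tabela_arestas (pai1 : List Int) (pai2 : List Int) : Prop :=
  pvCyclicConsistent pai1 ∧ pvCyclicConsistent pai2 ∧ ∀ x ∈ pai2, x ∈ pai1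
instance (pai1 : List Int) (pai2 : List Int) : Decidable (Pre_construir_tabela_arestas pai1 pai2) := by
  unfold Pre_construir_tabela_arestas pvCyclicConsistent; infer_instance

def pvWitness_construir_tabela_arestas : List Int × List Int := ([1, 2, 3], [2, 1, 3])

def Spec_construir_tabela_arestas (pai1 : List Int) (pai2 : List Int) (out : List (Int × List Int)) : Prop := out = construir_tabela_arestas_alt pai1 pai2
instance (pai1 : List Int) (pai2 : List Int) (out : List (Int × List Int)) : Decidable (Spec_construir_tabela_arestas pai1 pai2 out) := by unfold Spec_construir_tabela_arestas; infer_instance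

-- ===== CLAIM (what is proved, stated in full; the proofs are below) =====
def Claim_equal_construir_tabela_arestas : Prop := ∀ (pai1 : List Int) (pai2 : List Int), Dom_construir_tabela_arestas pai1 pai2 → Pre_construir_tabela_arestas pai1 pai2 → Spec_construir_tabela_arestas pai1 pai2 (construir_tabela_arestas pai1 pai2)

-- ===== LEMMAS AND PROOFS =====

-- the position A's .index finds for g, and the cyclic neighbors it reads off there
def pvIdx (lst : List Int) (g : Int) : Nat := (PySem.List.index? lst g).getD 0
def pvPrev (lst : List Int) (g : Int) : Int :=
  lst.getD ((pvIdx lst g + lst.length - 1) % lst.length) 0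
def pvNext (lst : List Int) (g : Int) : Int :=
  lst.getD ((pvIdx lst g + 1) % lst.length) 0

-- A's pyGet? at (m - 1) % n / (m + 1) % n, in cyclic-Nat form
lemma pvGetA_sub (lst : List Int) (m : Nat) (hm : m < lst.length) :
    PySem.List.pyGet? lst (PySem.Int.mod ((m : Int) - 1) (PySem.List.len lst))
      = some (lst.getD ((m + lst.length - 1) % lst.length) 0) := by
  have hpos : (0 : Int) < PySem.List.len lst := by simp [PySem.List.len_eq]; omega
  have hmod : PySem.Int.mod ((m : Int) - 1) (PySem.List.len lst)
      = (((m + lst.length - 1) % lst.length : Nat) : Int) := by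
    rw [PySem.Int.mod_eq_emod_of_pos hpos]
    have h2 : PySem.List.len lst = ((lst.length : Nat) : Int) := by simp [PySem.List.len_eq]
    have h1 : ((m : Int) - 1) = ((m + lst.length - 1 : Nat) : Int) - lst.length := by
      push_cast [Nat.cast_sub (by omega : 1 ≤ m + lst.length)]; ring
    rw [h2, h1, Int.sub_emod_right, ← Int.natCast_mod]
  rw [hmod, PySem.List.pyGet?_natCast]
  rw [List.getElem?_eq_getElem (Nat.mod_lt _ (by omega)),
      List.getD_eq_getElem lst 0 (Nat.mod_lt _ (by omega))]

lemma pvMod_add (lst : List Int) (k : Nat) (hk : k < lst.length) :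
    PySem.Int.mod ((k : Int) + 1) (PySem.List.len lst) = (((k + 1) % lst.length : Nat) : Int) := by
  have hpos : (0 : Int) < PySem.List.len lst := by simp [PySem.List.len_eq]; omega
  rw [PySem.Int.mod_eq_emod_of_pos hpos]
  have h1 : ((k : Int) + 1) = ((k + 1 : Nat) : Int) := by push_cast; ring
  have h2 : PySem.List.len lst = ((lst.length : Nat) : Int) := by simp [PySem.List.len_eq]
  rw [h1, h2, ← Int.natCast_mod]

lemma pvGetA_add (lst : List Int) (m : Nat) (hm : m < lst.length) :
    PySem.List.pyGet? lst (PySem.Int.mod ((m : Int) + 1) (PySem.List.len lst))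
      = some (lst.getD ((m + 1) % lst.length) 0) := by
  rw [pvMod_add lst m hm, PySem.List.pyGet?_natCast]
  rw [List.getElem?_eq_getElem (Nat.mod_lt _ (by omega)),
      List.getD_eq_getElem lst 0 (Nat.mod_lt _ (by omega))]

-- A's vizinhos succeeds on members and returns [pvPrev, pvNext]
lemma pvVizinhos_mem (lst : List Int) (g : Int) (hg : g ∈ lst) :
    pvVizinhos lst g = some [pvPrev lst g, pvNext lst g] := by
  obtain ⟨m, hidx⟩ := Option.isSome_iff_exists.mp ((PySem.List.index?_isSome_iff lst g).mpr hg)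
  obtain ⟨hm, hlm, -⟩ := PySem.List.getElem_of_index?_eq_some hidx
  have hI : pvIdx lst g = m := by simp only [pvIdx, hidx, Option.getD_some]
  unfold pvVizinhos
  rw [hidx]
  simp only [Option.bind_some]
  rw [pvGetA_sub lst m hm, pvGetA_add lst m hm]
  simp only [Option.bind_some, Option.map_some]
  rw [pvPrev, pvNext, hI]

-- membership via getD at an in-range index
lemma pvGetD_mem (lst : List Int) (k : Nat) (hk : k < lst.length) : lst.getD k 0 ∈ lst := by
  rw [List.getD_eq_getElem lst 0 hk]; exact List.getElem_mem hk

-- cyclic consistency: the predecessor A reads at the .index hit equals the one at any occurrence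
lemma pvPrev_at (lst : List Int) (hc : pvCyclicConsistent lst) (k : Nat) (hk : k < lst.length) :
    pvPrev lst (lst.getD ((k + 1) % lst.length) 0) = lst.getD k 0 := by
  set n := lst.length with hn
  have hn0 : 0 < n := by omega
  set j := (k + 1) % n with hj
  have hjn : j < n := Nat.mod_lt _ hn0
  set g := lst.getD j 0 with hgdef
  have hg : g ∈ lst := pvGetD_mem lst j hjn
  obtain ⟨m, hidx⟩ := Option.isSome_iff_exists.mp ((PySem.List.index?_isSome_iff lst g).mpr hg)
  obtain ⟨hm, hlm, -⟩ := PySem.List.getElem_of_index?_eq_some hidx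
  have hI : pvIdx lst g = m := by simp only [pvIdx, hidx, Option.getD_some]
  have heq : lst.getD m 0 = lst.getD j 0 := by
    rw [List.getD_eq_getElem lst 0 hm, hlm]
  obtain ⟨hprev, -⟩ := hc m hm j hjn heq
  have hjk : (j + n - 1) % n = k := by
    rcases Nat.lt_or_ge (k + 1) n with h | h
    · have : j = k + 1 := by rw [hj, Nat.mod_eq_of_lt h]
      rw [this]
      have : k + 1 + n - 1 = k + n := by omega
      rw [this, Nat.add_mod_right, Nat.mod_eq_of_lt (by omega)]
    · have hk1 : k + 1 = n := by omega
      have : j = 0 := by rw [hj, hk1, Nat.mod_self]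
      rw [this]
      have : 0 + n - 1 = k := by omega
      rw [this, Nat.mod_eq_of_lt (by omega)]
  rw [pvPrev, hI, hprev, hjk]

-- and the successor likewise
lemma pvNext_at (lst : List Int) (hc : pvCyclicConsistent lst) (k : Nat) (hk : k < lst.length) :
    pvNext lst (lst.getD k 0) = lst.getD ((k + 1) % lst.length) 0 := by
  set g := lst.getD k 0 with hgdef
  have hg : g ∈ lst := pvGetD_mem lst k hk
  obtain ⟨m, hidx⟩ := Option.isSome_iff_exists.mp ((PySem.List.index?_isSome_iff lst g).mpr hg)
  obtain ⟨hm, hlm, -⟩ := PySem.List.getElem_of_index?_eq_some hidx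
  have hI : pvIdx lst g = m := by simp only [pvIdx, hidx, Option.getD_some]
  have heq : lst.getD m 0 = lst.getD k 0 := by
    rw [List.getD_eq_getElem lst 0 hm, hlm]
  obtain ⟨-, hnext⟩ := hc m hm k hk heq
  rw [pvNext, hI, hnext]

-- generic: getD after a fold of inserts whose value depends only on the key
lemma pvGetD_foldl_insert_fun (L : List Int) (v : Int → PySem.Set Int)
    (d : PySem.Dict Int (PySem.Set Int)) (g : Int) :
    (L.foldl (fun d b => d.insert b (v b)) d).getD g PySem.Set.empty
      = if g ∈ L then v g else d.getD g PySem.Set.empty := by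
  induction L using List.reverseRecOn with
  | nil => simp
  | append_singleton L' b ih =>
    rw [List.foldl_append, List.foldl_cons, List.foldl_nil, PySem.Dict.getD_insert]
    by_cases hgb : g = b
    · subst hgb
      rw [if_pos rfl, if_pos (by simp)]
    · rw [if_neg hgb, ih]
      by_cases hgL : g ∈ L'
      · rw [if_pos hgL, if_pos (by simp [hgL])]
      · rw [if_neg hgL, if_neg (by simp [hgb, hgL])]

-- generic: getD after a fold of read-modify-insert steps with an idempotent per-key update
lemma pvGetD_foldl_accum (L : List Int) (f : Int → PySem.Set Int → PySem.Set Int)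
    (hid : ∀ b s, f b (f b s) = f b s)
    (d : PySem.Dict Int (PySem.Set Int)) (g : Int) :
    (L.foldl (fun d b => d.insert b (f b (d.getD b PySem.Set.empty))) d).getD g PySem.Set.empty
      = if g ∈ L then f g (d.getD g PySem.Set.empty) else d.getD g PySem.Set.empty := by
  induction L using List.reverseRecOn with
  | nil => simp
  | append_singleton L' b ih =>
    rw [List.foldl_append, List.foldl_cons, List.foldl_nil, PySem.Dict.getD_insert]
    by_cases hgb : g = b
    · subst hgb
      rw [if_pos rfl, if_pos (by simp), ih]
      by_cases hgL : g ∈ L'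
      · rw [if_pos hgL, hid]
      · rw [if_neg hgL]
    · rw [if_neg hgb, ih]
      by_cases hgL : g ∈ L'
      · rw [if_pos hgL, if_pos (by simp [hgL])]
      · rw [if_neg hgL, if_neg (by simp [hgb, hgL])]

-- Set.add is idempotent
lemma pvAdd_add (s : PySem.Set Int) (x : Int) :
    PySem.Set.add (PySem.Set.add s x) x = PySem.Set.add s x := by
  by_cases h : x ∈ s <;> simp [PySem.Set.add, h]

-- Set.update with already-present elements is the identity
lemma pvUpdate_of_subset (s : PySem.Set Int) (L : List Int) (h : ∀ x ∈ L, x ∈ s) :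
    PySem.Set.update s L = s := by
  rw [PySem.Set.update_eq_append_filter]
  have : (PySem.Set.ofList L).filter (fun y => !(PySem.Set.contains s y)) = [] := by
    apply List.filter_eq_nil_iff.mpr
    intro y hy
    have hys : y ∈ s := h y ((PySem.Set.mem_ofList L y).mp hy)
    simp [hys]
  rw [this, List.append_nil]

-- Set.update is idempotent
lemma pvUpdate_update (s : PySem.Set Int) (L : List Int) :
    PySem.Set.update (PySem.Set.update s L) L = PySem.Set.update s L := by
  apply pvUpdate_of_subset
  intro x hx
  exact (PySem.Set.mem_update s L x).mpr (Or.inr hx)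

-- A's first loop, option eliminated: inserts of the key-determined neighbor set
lemma pvFoldA1 (pai1 : List Int) :
    ∀ (L : List Int), (∀ g ∈ L, g ∈ pai1) → ∀ d,
      L.foldl (pvStepA1 pai1) (some d)
        = some (L.foldl (fun d g =>
            d.insert g (PySem.Set.ofList [pvPrev pai1 g, pvNext pai1 g])) d) := by
  intro L
  induction L with
  | nil => intro _ d; rfl
  | cons g rest ih =>
    intro hmem d
    rw [List.foldl_cons, List.foldl_cons]
    have hstep : pvStepA1 pai1 (some d) g
        = some (d.insert g (PySem.Set.ofList [pvPrev pai1 g, pvNext pai1 g])) := by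
      simp [pvStepA1, pvVizinhos_mem pai1 g (hmem g (by simp))]
    rw [hstep]
    exact ih (fun x hx => hmem x (by simp [hx])) _

-- A's second loop, option eliminated: read-modify-insert with Set.update
lemma pvFoldA2 (pai2 : List Int) :
    ∀ (L : List Int), (∀ g ∈ L, g ∈ pai2) → ∀ d, (∀ g ∈ L, d.contains g = true) →
      L.foldl (pvStepA2 pai2) (some d)
        = some (L.foldl (fun d g =>
            d.insert g (PySem.Set.update (d.getD g PySem.Set.empty)
              [pvPrev pai2 g, pvNext pai2 g])) d) := by
  intro L
  induction L with
  | nil => intro _ d _; rfl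
  | cons g rest ih =>
    intro hmem d hcont
    rw [List.foldl_cons, List.foldl_cons]
    have hc : d.contains g = true := hcont g (by simp)
    obtain ⟨s, hs⟩ : ∃ s, d.get? g = some s := by
      rw [PySem.Dict.contains_eq_isSome_get?] at hc
      exact Option.isSome_iff_exists.mp hc
    have hgd : d.getD g PySem.Set.empty = s := PySem.Dict.getD_of_get?_eq_some _ _ hs
    have hstep : pvStepA2 pai2 (some d) g
        = some (d.insert g (PySem.Set.update (d.getD g PySem.Set.empty)
            [pvPrev pai2 g, pvNext pai2 g])) := by
      simp only [pvStepA2, Option.bind_some, hs, pvVizinhos_mem pai2 g (hmem g (by simp)),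
        Option.map_some]
      rw [hgd]
    rw [hstep]
    refine ih (fun x hx => hmem x (by simp [hx])) _ (fun x hx => ?_)
    rw [PySem.Dict.contains_insert]
    simp [hcont x (by simp [hx])]

-- the key list of B's first sweep: lst[(k+1) % n] for k = 0 .. n-1
def pvRotKeys (lst : List Int) : List Int :=
  (List.range lst.length).map (fun k => lst.getD ((k + 1) % lst.length) 0)

lemma pvMem_rotKeys (lst : List Int) (g : Int) : g ∈ pvRotKeys lst ↔ g ∈ lst := by
  constructor
  · intro h
    obtain ⟨k, hk, hg⟩ := List.mem_map.mp h
    have hk' : k < lst.length := List.mem_range.mp hk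
    rw [← hg]
    exact pvGetD_mem lst _ (Nat.mod_lt _ (by omega))
  · intro h
    obtain ⟨j, hj, hg⟩ := List.mem_iff_getElem.mp h
    have hn0 : 0 < lst.length := by omega
    refine List.mem_map.mpr ⟨(j + lst.length - 1) % lst.length, List.mem_range.mpr (Nat.mod_lt _ hn0), ?_⟩
    have harith : ((j + lst.length - 1) % lst.length + 1) % lst.length = j := by
      rcases Nat.eq_zero_or_pos j with hj0 | hj0
      · subst hj0
        have h1 : (0 + lst.length - 1) % lst.length = lst.length - 1 := by
          have e : 0 + lst.length - 1 = lst.length - 1 := by omega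
          rw [e, Nat.mod_eq_of_lt (by omega)]
        rw [h1]
        have h2 : lst.length - 1 + 1 = lst.length := by omega
        rw [h2, Nat.mod_self]
      · have h1 : (j + lst.length - 1) % lst.length = j - 1 := by
          have : j + lst.length - 1 = (j - 1) + lst.length := by omega
          rw [this, Nat.add_mod_right, Nat.mod_eq_of_lt (by omega)]
        rw [h1]
        have : j - 1 + 1 = j := by omega
        rw [this, Nat.mod_eq_of_lt hj]
    rw [harith, List.getD_eq_getElem lst 0 hj, hg]

-- B's first sweep, option eliminated: accumulate-fold over pvRotKeys adding the predecessor
lemma pvFoldB1 (lst : List Int) (hc : pvCyclicConsistent lst) :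
    ∀ (t s : Nat) (d : PySem.Dict Int (PySem.Set Int)), s + t = lst.length →
      (∀ x ∈ lst, d.contains x = true) →
      (PySem.List.pyRange (s : Int) (PySem.List.len lst) 1).foldl (pvSweepPrev lst) (some d)
        = some (((pvRotKeys lst).drop s).foldl (fun d b =>
            d.insert b (PySem.Set.add (d.getD b PySem.Set.empty) (pvPrev lst b))) d) := by
  intro t
  induction t with
  | zero =>
    intro s d hst _
    have h1 : PySem.List.pyRange (s : Int) (PySem.List.len lst) 1 = [] := by
      apply PySem.List.pyRange_one_eq_nil
      simp [PySem.List.len_eq]; omega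
    have h2 : (pvRotKeys lst).drop s = [] := by
      apply List.drop_eq_nil_of_le
      simp [pvRotKeys]; omega
    rw [h1, h2]; rfl
  | succ t ih =>
    intro s d hst hcont
    have hsn : s < lst.length := by omega
    have hcons : PySem.List.pyRange (s : Int) (PySem.List.len lst) 1
        = (s : Int) :: PySem.List.pyRange ((s : Int) + 1) (PySem.List.len lst) 1 := by
      apply PySem.List.pyRange_one_cons
      simp [PySem.List.len_eq]; omega
    have hrot : (pvRotKeys lst).drop s
        = lst.getD ((s + 1) % lst.length) 0 :: (pvRotKeys lst).drop (s + 1) := by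
      have hlen : s < (pvRotKeys lst).length := by simp [pvRotKeys]; omega
      rw [List.drop_eq_getElem_cons hlen]
      congr 1
      simp [pvRotKeys]
    set b := lst.getD ((s + 1) % lst.length) 0 with hb
    have hbmem : b ∈ lst := pvGetD_mem lst _ (Nat.mod_lt _ (by omega))
    obtain ⟨sb, hsb⟩ : ∃ sb, d.get? b = some sb := by
      have := hcont b hbmem
      rw [PySem.Dict.contains_eq_isSome_get?] at this
      exact Option.isSome_iff_exists.mp this
    have hgd : d.getD b PySem.Set.empty = sb := PySem.Dict.getD_of_get?_eq_some _ _ hsb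
    have hget1 : PySem.List.pyGet? lst (PySem.Int.mod ((s : Int) + 1) (PySem.List.len lst))
        = some b := by
      rw [pvGetA_add lst s hsn]
    have hget2 : PySem.List.pyGet? lst (s : Int) = some (lst.getD s 0) := by
      rw [PySem.List.pyGet?_natCast, List.getElem?_eq_getElem hsn, List.getD_eq_getElem lst 0 hsn]
    have hstep : pvSweepPrev lst (some d) (s : Int)
        = some (d.insert b (PySem.Set.add (d.getD b PySem.Set.empty) (pvPrev lst b))) := by
      simp only [pvSweepPrev, Option.bind_some, hget1, hget2, hsb, Option.map_some]
      rw [hgd, hb, pvPrev_at lst hc s hsn]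
    rw [hcons, List.foldl_cons, hstep, hrot, List.foldl_cons]
    have : ((s : Int) + 1) = ((s + 1 : Nat) : Int) := by push_cast; ring
    rw [this]
    refine ih (s + 1) _ (by omega) (fun x hx => ?_)
    rw [PySem.Dict.contains_insert]
    simp [hcont x hx]

-- B's second sweep, option eliminated: accumulate-fold over lst adding the successor
lemma pvFoldB2 (lst : List Int) (hc : pvCyclicConsistent lst) :
    ∀ (t s : Nat) (d : PySem.Dict Int (PySem.Set Int)), s + t = lst.length →
      (∀ x ∈ lst, d.contains x = true) →
      (PySem.List.pyRange (s : Int) (PySem.List.len lst) 1).foldl (pvSweepNext lst) (some d)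
        = some ((lst.drop s).foldl (fun d b =>
            d.insert b (PySem.Set.add (d.getD b PySem.Set.empty) (pvNext lst b))) d) := by
  intro t
  induction t with
  | zero =>
    intro s d hst _
    have h1 : PySem.List.pyRange (s : Int) (PySem.List.len lst) 1 = [] := by
      apply PySem.List.pyRange_one_eq_nil
      simp [PySem.List.len_eq]; omega
    have h2 : lst.drop s = [] := List.drop_eq_nil_of_le (by omega)
    rw [h1, h2]; rfl
  | succ t ih =>
    intro s d hst hcont
    have hsn : s < lst.length := by omega
    have hcons : PySem.List.pyRange (s : Int) (PySem.List.len lst) 1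
        = (s : Int) :: PySem.List.pyRange ((s : Int) + 1) (PySem.List.len lst) 1 := by
      apply PySem.List.pyRange_one_cons
      simp [PySem.List.len_eq]; omega
    have hdrop : lst.drop s = lst[s] :: lst.drop (s + 1) := List.drop_eq_getElem_cons hsn
    set a := lst[s] with ha
    have hamem : a ∈ lst := List.getElem_mem hsn
    obtain ⟨sa, hsa⟩ : ∃ sa, d.get? a = some sa := by
      have := hcont a hamem
      rw [PySem.Dict.contains_eq_isSome_get?] at this
      exact Option.isSome_iff_exists.mp this
    have hgd : d.getD a PySem.Set.empty = sa := PySem.Dict.getD_of_get?_eq_some _ _ hsa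
    have hgetDa : lst.getD s 0 = a := by rw [List.getD_eq_getElem lst 0 hsn]
    have hget1 : PySem.List.pyGet? lst (s : Int) = some a := by
      rw [PySem.List.pyGet?_natCast, List.getElem?_eq_getElem hsn]
    have hget2 : PySem.List.pyGet? lst (PySem.Int.mod ((s : Int) + 1) (PySem.List.len lst))
        = some (lst.getD ((s + 1) % lst.length) 0) := pvGetA_add lst s hsn
    have hnx : lst.getD ((s + 1) % lst.length) 0 = pvNext lst a := by
      rw [← hgetDa, pvNext_at lst hc s hsn]
    have hstep : pvSweepNext lst (some d) (s : Int)
        = some (d.insert a (PySem.Set.add (d.getD a PySem.Set.empty) (pvNext lst a))) := by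
      simp only [pvSweepNext, Option.bind_some, hget1, hget2, hsa, Option.map_some]
      rw [hgd, hnx]
    rw [hcons, List.foldl_cons, hstep, hdrop, List.foldl_cons]
    have : ((s : Int) + 1) = ((s + 1 : Nat) : Int) := by push_cast; ring
    rw [this]
    refine ih (s + 1) _ (by omega) (fun x hx => ?_)
    rw [PySem.Dict.contains_insert]
    simp [hcont x hx]

-- B's pass over one parent, option eliminated: the two accumulate-folds
lemma pvParentPass_eq (lst : List Int) (hc : pvCyclicConsistent lst)
    (d : PySem.Dict Int (PySem.Set Int)) (hcont : ∀ x ∈ lst, d.contains x = true) :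
    pvParentPass (some d) lst
      = some (lst.foldl (fun d b =>
            d.insert b (PySem.Set.add (d.getD b PySem.Set.empty) (pvNext lst b)))
          ((pvRotKeys lst).foldl (fun d b =>
            d.insert b (PySem.Set.add (d.getD b PySem.Set.empty) (pvPrev lst b))) d)) := by
  have h1 := pvFoldB1 lst hc lst.length 0 d (by omega) hcont
  rw [Nat.cast_zero, List.drop_zero] at h1
  set d1 := (pvRotKeys lst).foldl (fun d b =>
      d.insert b (PySem.Set.add (d.getD b PySem.Set.empty) (pvPrev lst b))) d with hd1
  have hcont1 : ∀ x ∈ lst, d1.contains x = true := by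
    intro x hx
    rw [PySem.Dict.contains_iff_mem_keys]
    rw [hd1, PySem.Dict.keys_foldl_insert]
    exact (PySem.Set.mem_update d.keys (pvRotKeys lst) x).mpr
      (Or.inl ((PySem.Dict.contains_iff_mem_keys d x).mp (hcont x hx)))
  have h2 := pvFoldB2 lst hc lst.length 0 d1 (by omega) hcont1
  rw [Nat.cast_zero, List.drop_zero] at h2
  simp only [pvParentPass]
  rw [h1, h2]

-- getD after one of B's parent passes
lemma pvGetD_pass (lst : List Int) (d : PySem.Dict Int (PySem.Set Int)) (g : Int) :
    (lst.foldl (fun d b =>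
        d.insert b (PySem.Set.add (d.getD b PySem.Set.empty) (pvNext lst b)))
      ((pvRotKeys lst).foldl (fun d b =>
        d.insert b (PySem.Set.add (d.getD b PySem.Set.empty) (pvPrev lst b))) d)).getD g PySem.Set.empty
      = if g ∈ lst then
          PySem.Set.add (PySem.Set.add (d.getD g PySem.Set.empty) (pvPrev lst g)) (pvNext lst g)
        else d.getD g PySem.Set.empty := by
  rw [pvGetD_foldl_accum lst (fun b s => PySem.Set.add s (pvNext lst b))
        (fun b s => pvAdd_add s _),
      pvGetD_foldl_accum (pvRotKeys lst) (fun b s => PySem.Set.add s (pvPrev lst b))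
        (fun b s => pvAdd_add s _)]
  by_cases h : g ∈ lst
  · rw [if_pos h, if_pos ((pvMem_rotKeys lst g).mpr h), if_pos h]
  · rw [if_neg h, if_neg (fun hh => h ((pvMem_rotKeys lst g).mp hh)), if_neg h]

-- the whole equivalence, at the Dict/items level
lemma pvMain (pai1 pai2 : List Int) (hc1 : pvCyclicConsistent pai1)
    (hc2 : pvCyclicConsistent pai2) (hsub : ∀ x ∈ pai2, x ∈ pai1) :
    construir_tabela_arestas pai1 pai2 = construir_tabela_arestas_alt pai1 pai2 := by
  -- A side
  have hA1 := pvFoldA1 pai1 pai1 (fun g hg => hg) PySem.Dict.empty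
  set dA1 := pai1.foldl (fun d g =>
      d.insert g (PySem.Set.ofList [pvPrev pai1 g, pvNext pai1 g])) PySem.Dict.empty with hdA1
  have hkA1 : dA1.keys = PySem.Set.ofList pai1 := by
    rw [hdA1, PySem.Dict.keys_foldl_insert, PySem.Dict.keys_empty, PySem.Set.update_nil_left]
  have hcontA1 : ∀ g ∈ pai2, dA1.contains g = true := by
    intro g hg
    rw [PySem.Dict.contains_iff_mem_keys, hkA1]
    exact (PySem.Set.mem_ofList pai1 g).mpr (hsub g hg)
  have hA2 := pvFoldA2 pai2 pai2 (fun g hg => hg) dA1 hcontA1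
  set dA2 := pai2.foldl (fun d g =>
      d.insert g (PySem.Set.update (d.getD g PySem.Set.empty)
        [pvPrev pai2 g, pvNext pai2 g])) dA1 with hdA2
  have hAval : construir_tabela_arestas pai1 pai2 = dA2.items := by
    unfold construir_tabela_arestas
    rw [hA1, hA2]
    rfl
  -- B side
  set d0 := pai1.foldl (fun d g => d.insert g (PySem.Set.empty : PySem.Set Int)) PySem.Dict.empty with hd0
  have hk0 : d0.keys = PySem.Set.ofList pai1 := by
    rw [hd0, PySem.Dict.keys_foldl_insert, PySem.Dict.keys_empty, PySem.Set.update_nil_left]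
  have hcont0 : ∀ x ∈ pai1, d0.contains x = true := by
    intro x hx
    rw [PySem.Dict.contains_iff_mem_keys, hk0]
    exact (PySem.Set.mem_ofList pai1 x).mpr hx
  have hP1 := pvParentPass_eq pai1 hc1 d0 hcont0
  set dB1 := pai1.foldl (fun d b =>
      d.insert b (PySem.Set.add (d.getD b PySem.Set.empty) (pvNext pai1 b)))
    ((pvRotKeys pai1).foldl (fun d b =>
      d.insert b (PySem.Set.add (d.getD b PySem.Set.empty) (pvPrev pai1 b))) d0) with hdB1
  have hkB1 : dB1.keys = PySem.Set.ofList pai1 := by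
    rw [hdB1, PySem.Dict.keys_foldl_insert, PySem.Dict.keys_foldl_insert, hk0]
    rw [pvUpdate_of_subset _ _ (fun x hx =>
      (PySem.Set.mem_ofList pai1 x).mpr ((pvMem_rotKeys pai1 x).mp hx))]
    rw [pvUpdate_of_subset _ _ (fun x hx => (PySem.Set.mem_ofList pai1 x).mpr hx)]
  have hcontB1 : ∀ x ∈ pai2, dB1.contains x = true := by
    intro x hx
    rw [PySem.Dict.contains_iff_mem_keys, hkB1]
    exact (PySem.Set.mem_ofList pai1 x).mpr (hsub x hx)
  have hP2 := pvParentPass_eq pai2 hc2 dB1 hcontB1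
  set dB2 := pai2.foldl (fun d b =>
      d.insert b (PySem.Set.add (d.getD b PySem.Set.empty) (pvNext pai2 b)))
    ((pvRotKeys pai2).foldl (fun d b =>
      d.insert b (PySem.Set.add (d.getD b PySem.Set.empty) (pvPrev pai2 b))) dB1) with hdB2
  have hBval : construir_tabela_arestas_alt pai1 pai2 = dB2.items := by
    unfold construir_tabela_arestas_alt
    simp only [List.foldl_cons, List.foldl_nil]
    rw [← hd0, hP1, hP2]
    rfl
  -- keys of the final dicts
  have hkA2 : dA2.keys = PySem.Set.ofList pai1 := by
    rw [hdA2, PySem.Dict.keys_foldl_insert, hkA1,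
        pvUpdate_of_subset _ _ (fun x hx => (PySem.Set.mem_ofList pai1 x).mpr (hsub x hx))]
  have hkB2 : dB2.keys = PySem.Set.ofList pai1 := by
    rw [hdB2, PySem.Dict.keys_foldl_insert, PySem.Dict.keys_foldl_insert, hkB1]
    rw [pvUpdate_of_subset _ _ (fun x hx =>
      (PySem.Set.mem_ofList pai1 x).mpr (hsub x ((pvMem_rotKeys pai2 x).mp hx)))]
    rw [pvUpdate_of_subset _ _ (fun x hx => (PySem.Set.mem_ofList pai1 x).mpr (hsub x hx))]
  -- items via keys + getD
  rw [hAval, hBval,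
      PySem.Dict.items_eq_map_keys dA2 (hkA2 ▸ PySem.Set.nodup_ofList pai1) PySem.Set.empty,
      PySem.Dict.items_eq_map_keys dB2 (hkB2 ▸ PySem.Set.nodup_ofList pai1) PySem.Set.empty,
      hkA2, hkB2]
  apply List.map_congr_left
  intro g hgk
  have hg1 : g ∈ pai1 := (PySem.Set.mem_ofList pai1 g).mp hgk
  have eA1 : dA1.getD g PySem.Set.empty = PySem.Set.ofList [pvPrev pai1 g, pvNext pai1 g] := by
    rw [hdA1, pvGetD_foldl_insert_fun, if_pos hg1]
  have eA2 : dA2.getD g PySem.Set.empty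
      = if g ∈ pai2 then
          PySem.Set.update (PySem.Set.ofList [pvPrev pai1 g, pvNext pai1 g])
            [pvPrev pai2 g, pvNext pai2 g]
        else PySem.Set.ofList [pvPrev pai1 g, pvNext pai1 g] := by
    rw [hdA2, pvGetD_foldl_accum pai2
      (fun b s => PySem.Set.update s [pvPrev pai2 b, pvNext pai2 b])
      (fun b s => pvUpdate_update s _), eA1]
  have e0 : d0.getD g PySem.Set.empty = PySem.Set.empty := by
    rw [hd0, pvGetD_foldl_insert_fun]
    split_ifs
    all_goals rfl
  have eB1 : dB1.getD g PySem.Set.empty = PySem.Set.ofList [pvPrev pai1 g, pvNext pai1 g] := by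
    rw [hdB1, pvGetD_pass, if_pos hg1, e0]
    rfl
  have eB2 : dB2.getD g PySem.Set.empty
      = if g ∈ pai2 then
          PySem.Set.update (PySem.Set.ofList [pvPrev pai1 g, pvNext pai1 g])
            [pvPrev pai2 g, pvNext pai2 g]
        else PySem.Set.ofList [pvPrev pai1 g, pvNext pai1 g] := by
    rw [hdB2, pvGetD_pass, eB1]
    by_cases h2 : g ∈ pai2
    · rw [if_pos h2, if_pos h2]
      rfl
    · rw [if_neg h2, if_neg h2]
  rw [eA2, eB2]

-- ===== VERDICT (by name: the statement is the Claim_ definition above) =====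
theorem construir_tabela_arestas_spec : Claim_equal_construir_tabela_arestas := by
  intro pai1 pai2 _hdom hpre
  obtain ⟨hc1, hc2, hsub⟩ := hpre
  exact pvMain pai1 pai2 hc1 hc2 hsub
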